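-- pv_equiv track=rewrite | github.com/MNico99/Sintaxis-TP01 | automatas.py | A_Num
-- ===== SOURCE A (Python) =====
-- TRAMPA = -1
--
-- RESULTADO_ACEPTADO = "ACEPTADO"
--
-- RESULTADO_TRAMPA = "TRAMPA"
--
-- RESULTADO_NO_ACEPTADO = "NO_ACEPTADO"
--
-- def d_Num(estado_anterior, caracter):
--     if estado_anterior == 0 and caracter.isdigit():
--         return 1
--     if estado_anterior == 1 and caracter.isdigit():
--         return 1
--     if estado_anterior == 1 and caracter == ".":
--         return 2
--     if estado_anterior == 2 and caracter.isdigit():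
--         return 3
--     if estado_anterior == 3 and caracter.isdigit():
--         return 3
--
--
--     return TRAMPA
--
-- def A_Num(cadena):
--     Finales = [1, 3]
--     estado_actual = 0
--
--     for caracter in cadena:
--         estado_proximo = d_Num(estado_actual, caracter)
--         if estado_proximo == TRAMPA:
--             return RESULTADO_TRAMPA
--         estado_actual = estado_proximo
--
--     if estado_actual in Finales:
--         return RESULTADO_ACEPTADO
--     else:
--         return RESULTADO_NO_ACEPTADO
-- ===== SOURCE B (Python) =====
-- RESULTADO_ACEPTADO = "ACEPTADO"
--
-- RESULTADO_TRAMPA = "TRAMPA"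
--
-- RESULTADO_NO_ACEPTADO = "NO_ACEPTADO"
--
-- def A_Num(cadena):
--     i = cadena.find(".")
--     if i == -1:
--         if cadena == "":
--             return RESULTADO_NO_ACEPTADO
--         return RESULTADO_ACEPTADO if cadena.isdigit() else RESULTADO_TRAMPA
--     pre, suf = cadena[:i], cadena[i + 1:]
--     if not pre.isdigit():
--         return RESULTADO_TRAMPA
--     if suf == "":
--         return RESULTADO_NO_ACEPTADO
--     return RESULTADO_ACEPTADO if suf.isdigit() else RESULTADO_TRAMPA
-- ===== Notes on version B (the rewrite author's own statement) =====
-- stated objective: simpler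
-- what changed: B drops the DFA transition table and state loop entirely: it locates the first dot with str.find and classifies the string by its shape (all digits, or an all-digit integer part followed by a dot and an optional all-digit fraction) using str.isdigit on the two slices.
import Mathlib
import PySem

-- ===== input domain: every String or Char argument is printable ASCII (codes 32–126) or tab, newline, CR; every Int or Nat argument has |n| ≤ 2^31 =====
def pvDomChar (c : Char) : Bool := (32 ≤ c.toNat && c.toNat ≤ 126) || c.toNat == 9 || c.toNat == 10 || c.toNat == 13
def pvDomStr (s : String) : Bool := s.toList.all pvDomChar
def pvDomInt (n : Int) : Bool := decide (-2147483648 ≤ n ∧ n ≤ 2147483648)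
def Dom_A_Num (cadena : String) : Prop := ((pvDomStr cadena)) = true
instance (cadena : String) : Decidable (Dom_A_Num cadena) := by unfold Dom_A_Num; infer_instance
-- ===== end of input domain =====

-- B replaces A's state-machine walk by a direct shape classification around the first dot (objective: simpler).

-- ===== PORT A =====
def dNum (estadoAnterior : Int) (caracter : Char) : Int :=
  if estadoAnterior = 0 ∧ PySem.Chars.isdigit caracter then 1
  else if estadoAnterior = 1 ∧ PySem.Chars.isdigit caracter then 1
  else if estadoAnterior = 1 ∧ caracter = '.' then 2
  else if estadoAnterior = 2 ∧ PySem.Chars.isdigit caracter then 3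
  else if estadoAnterior = 3 ∧ PySem.Chars.isdigit caracter then 3
  else -1

def aNumLoop (estadoActual : Int) : List Char → String
  | [] => if estadoActual = 1 ∨ estadoActual = 3 then "ACEPTADO" else "NO_ACEPTADO"
  | caracter :: rest =>
    let estadoProximo := dNum estadoActual caracter
    if estadoProximo = -1 then "TRAMPA" else aNumLoop estadoProximo rest

def A_Num (cadena : String) : String := aNumLoop 0 cadena.toList

-- ===== PORT B =====
def A_Num_alt (cadena : String) : String :=
  let l := cadena.toList
  let i := PySem.Chars.find l ['.']
  if i = -1 then
    if l = [] then "NO_ACEPTADO"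
    else if PySem.Chars.strIsdigit l then "ACEPTADO" else "TRAMPA"
  else
    let pre := PySem.List.slice l none (some i)
    let suf := PySem.List.slice l (some (i + 1)) none
    if ¬ PySem.Chars.strIsdigit pre then "TRAMPA"
    else if suf = [] then "NO_ACEPTADO"
    else if PySem.Chars.strIsdigit suf then "ACEPTADO" else "TRAMPA"

-- ===== PRECONDITION & SPEC =====
def Spec_A_Num (cadena : String) (out : String) : Prop := out = A_Num_alt cadena
instance (cadena : String) (out : String) : Decidable (Spec_A_Num cadena out) := by unfold Spec_A_Num; infer_instance

-- ===== CLAIM (what is proved, stated in full; the proofs are below) =====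
def Claim_equal_A_Num : Prop := ∀ (cadena : String), Dom_A_Num cadena → Spec_A_Num cadena (A_Num cadena)

-- ===== LEMMAS AND PROOFS =====

theorem singleton_prefix_iff {a : Char} {m : List Char} : [a] <+: m ↔ ∃ t, m = a :: t := by
  constructor
  · rintro ⟨t, rfl⟩; exact ⟨t, rfl⟩
  · rintro ⟨t, rfl⟩; exact ⟨t, rfl⟩

theorem loop3_eq (l : List Char) :
    aNumLoop 3 l = if l.all PySem.Chars.isdigit then "ACEPTADO" else "TRAMPA" := by
  induction l with
  | nil => simp [aNumLoop]
  | cons c r ih =>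
    by_cases hc : PySem.Chars.isdigit c
    · simp [aNumLoop, dNum, hc, ih]
    · simp [aNumLoop, dNum, hc]

theorem loop2_eq (l : List Char) :
    aNumLoop 2 l = if l = [] then "NO_ACEPTADO"
      else if l.all PySem.Chars.isdigit then "ACEPTADO" else "TRAMPA" := by
  cases l with
  | nil => simp [aNumLoop]
  | cons c r =>
    by_cases hc : PySem.Chars.isdigit c
    · simp [aNumLoop, dNum, hc, loop3_eq]
    · simp [aNumLoop, dNum, hc]

theorem loop1_no_dot (l : List Char) (h : '.' ∉ l) :
    aNumLoop 1 l = if l.all PySem.Chars.isdigit then "ACEPTADO" else "TRAMPA" := by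
  induction l with
  | nil => simp [aNumLoop]
  | cons c r ih =>
    have hc' : c ≠ '.' := fun hx => h (hx ▸ List.mem_cons_self)
    by_cases hc : PySem.Chars.isdigit c
    · simp [aNumLoop, dNum, hc, ih (fun hm => h (List.mem_cons_of_mem _ hm))]
    · simp [aNumLoop, dNum, hc, hc']

theorem loop1_dot (p s : List Char) (h : '.' ∉ p) :
    aNumLoop 1 (p ++ '.' :: s) =
      if p.all PySem.Chars.isdigit then aNumLoop 2 s else "TRAMPA" := by
  have hdot : PySem.Chars.isdigit '.' = false := by decide
  induction p with
  | nil => simp [aNumLoop, dNum, hdot]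
  | cons c r ih =>
    have hc' : c ≠ '.' := fun hx => h (hx ▸ List.mem_cons_self)
    by_cases hc : PySem.Chars.isdigit c
    · simp [aNumLoop, dNum, hc, ih (fun hm => h (List.mem_cons_of_mem _ hm))]
    · simp [aNumLoop, dNum, hc, hc']

theorem loop0_no_dot (l : List Char) (h : '.' ∉ l) :
    aNumLoop 0 l = if l = [] then "NO_ACEPTADO"
      else if l.all PySem.Chars.isdigit then "ACEPTADO" else "TRAMPA" := by
  cases l with
  | nil => simp [aNumLoop]
  | cons c r =>
    have hc' : c ≠ '.' := fun hx => h (hx ▸ List.mem_cons_self)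
    by_cases hc : PySem.Chars.isdigit c
    · simp [aNumLoop, dNum, hc, loop1_no_dot r (fun hm => h (List.mem_cons_of_mem _ hm))]
    · simp [aNumLoop, dNum, hc, hc']

theorem loop0_dot (p s : List Char) (h : '.' ∉ p) :
    aNumLoop 0 (p ++ '.' :: s) =
      if PySem.Chars.strIsdigit p then aNumLoop 2 s else "TRAMPA" := by
  have hdot : PySem.Chars.isdigit '.' = false := by decide
  cases p with
  | nil => simp [aNumLoop, dNum, hdot, PySem.Chars.strIsdigit]
  | cons c r =>
    have hc' : c ≠ '.' := fun hx => h (hx ▸ List.mem_cons_self)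
    by_cases hc : PySem.Chars.isdigit c
    · simp [aNumLoop, dNum, hc, PySem.Chars.strIsdigit,
        loop1_dot r s (fun hm => h (List.mem_cons_of_mem _ hm))]
    · simp [aNumLoop, dNum, hc, hc', PySem.Chars.strIsdigit]

-- ===== VERDICT (by name: the statement is the Claim_ definition above) =====
theorem A_Num_spec : Claim_equal_A_Num := by
  intro cadena _
  unfold Spec_A_Num A_Num A_Num_alt
  set l := cadena.toList with hl
  by_cases hfind : PySem.Chars.find l ['.'] = -1
  · -- no dot in the string
    have hnd : '.' ∉ l := by
      intro hm
      obtain ⟨p, q, hpq⟩ := List.append_of_mem hm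
      exact ((PySem.Chars.find_eq_neg_one_iff l ['.']).mp hfind)
        ⟨p, q, by simp [hpq]⟩
    simp only [hfind, loop0_no_dot l hnd, PySem.Chars.strIsdigit]
    by_cases hnil : l = []
    · simp [hnil]
    · simp [hnil]
  · -- a first dot at index i
    have hge : 0 ≤ PySem.Chars.find l ['.'] := by
      have := PySem.Chars.neg_one_le_find l ['.']
      omega
    obtain ⟨hpre, hmin⟩ := PySem.Chars.find_spec hge
    set i := PySem.Chars.find l ['.'] with hi
    obtain ⟨s, hs⟩ := singleton_prefix_iff.mp hpre
    set k := i.toNat with hk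
    have hkl : k < l.length := by
      by_contra hko
      have hdn : l.drop k = [] := List.drop_eq_nil_of_le (by omega)
      rw [hdn] at hs; simp at hs
    have hdecomp : l = l.take k ++ '.' :: s := by
      conv_lhs => rw [← List.take_append_drop k l, hs]
    have hnd : '.' ∉ l.take k := by
      intro hm
      obtain ⟨j, hj, hgj⟩ := List.mem_iff_getElem.mp hm
      have hjk : j < k := by
        have h1 : (l.take k).length = min k l.length := List.length_take
        rw [h1] at hj; omega
      have hjl : j < l.length := by omega
      rw [List.getElem_take] at hgj
      refine hmin j hjk (singleton_prefix_iff.mpr ⟨l.drop (j + 1), ?_⟩)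
      rw [List.drop_eq_getElem_cons hjl, hgj]
    have hslice_pre : PySem.List.slice l none (some i) = l.take k := by
      rw [PySem.List.slice_to l hge]
    have hsuf : l.drop (k + 1) = s := by
      have hc := congrArg (List.drop 1) hs
      simpa [List.drop_drop, Nat.add_comm] using hc
    have hslice_suf : PySem.List.slice l (some (i + 1)) none = s := by
      rw [PySem.List.slice_from l (by omega)]
      have hto : (i + 1).toNat = k + 1 := by omega
      rw [hto, hsuf]
    rw [if_neg hfind, hslice_pre, hslice_suf]
    conv_lhs => rw [hdecomp]
    rw [loop0_dot (l.take k) s hnd, loop2_eq]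
    by_cases hpd : PySem.Chars.strIsdigit (l.take k)
    · by_cases hse : s = []
      · simp [hpd, hse]
      · have hsd : PySem.Chars.strIsdigit s = s.all PySem.Chars.isdigit := by
          simp [PySem.Chars.strIsdigit, hse]
        simp [hpd, hse, hsd]
    · simp [hpd]
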